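-- pv_equiv track=rewrite | github.com/WhiteLicorice/Fake | server/root/tagalog_stemmer.py | suffix_remover
-- ===== SOURCE A (Python) =====
-- import copy
--
-- SUFFIX = [
--     'han', 'hin',
--     'ing', 'ang',
--     'ng', 'an',
--     'in',
-- ]
--
-- def sort_list_by_str_len(lst):
--     return sorted(copy.deepcopy(lst), key=lambda p: len(p), reverse=True)
--
-- def suffix_remover(data):
--     stemmed = data
--     for suffix in sort_list_by_str_len(SUFFIX):
--         stemmed_len = len(stemmed)
--         end_suffix_start = stemmed_len-len(suffix)
--         if stemmed[end_suffix_start:stemmed_len] == suffix: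
--             stemmed = stemmed[0:end_suffix_start]
--             break
--     return stemmed
-- ===== SOURCE B (Python) =====
-- def _strip_len(r):
--     # r is the word reversed; walk a hand-coded character trie of reversed
--     # suffixes (nah nih gni gna / gn na ni) and return how many chars to strip.
--     if r[:1] == 'n':
--         if r[1:2] == 'a' or r[1:2] == 'i':
--             return 3 if r[2:3] == 'h' else 2
--         return 0
--     if r[:1] == 'g':
--         if r[1:2] == 'n':
--             return 3 if r[2:3] == 'i' or r[2:3] == 'a' else 2
--         return 0
--     return 0
--
-- def suffix_remover(data):
--     k = _strip_len(data[::-1])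
--     return data[:len(data)-k] if k else data
-- ===== Notes on version B (the rewrite author's own statement) =====
-- stated objective: alternative
-- what changed: Replaces the deepcopy+sort over a suffix list and the slice-comparing loop by a hand-coded character trie (DFA) over the reversed string: it reads at most three characters of data[::-1], branching per character, and computes the strip length directly -- no suffix collection, no sorting, no iteration or membership test.
import Mathlib
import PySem

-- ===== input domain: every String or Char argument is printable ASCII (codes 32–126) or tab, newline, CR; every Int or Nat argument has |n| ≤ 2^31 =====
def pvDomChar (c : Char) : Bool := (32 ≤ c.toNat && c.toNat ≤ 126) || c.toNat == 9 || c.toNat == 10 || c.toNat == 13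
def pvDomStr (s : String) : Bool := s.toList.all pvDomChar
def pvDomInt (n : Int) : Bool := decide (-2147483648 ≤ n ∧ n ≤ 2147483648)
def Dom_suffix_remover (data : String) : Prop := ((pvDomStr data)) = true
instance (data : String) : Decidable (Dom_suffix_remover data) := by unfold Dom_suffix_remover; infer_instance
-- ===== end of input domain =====

-- B replaces A's deepcopy+sort and suffix-iterating loop by a hand-coded character
-- trie over the reversed string that computes the strip length directly (alternative
-- decomposition; same return value for every input).


-- ===== PORT A =====
-- module constant SUFFIX (list of strings, as lists of chars)
def pvSUFFIX : List (List Char) :=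
  [['h','a','n'], ['h','i','n'], ['i','n','g'], ['a','n','g'], ['n','g'], ['a','n'], ['i','n']]

-- sort_list_by_str_len: sorted(copy.deepcopy(lst), key=len, reverse=True); deepcopy is the identity on these pure values
def pvSortListByStrLen (lst : List (List Char)) : List (List Char) :=
  PySem.List.sorted lst (fun p => (p.length : Int)) true

-- the for-loop with its break, step for step
def pvSuffixLoop (stemmed : List Char) : List (List Char) → List Char
  | [] => stemmed
  | suffix :: rest =>
    let stemmedLen : Int := stemmed.length
    let endSuffixStart : Int := stemmedLen - suffix.length
    if PySem.List.slice stemmed (some endSuffixStart) (some stemmedLen) = suffix then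
      PySem.List.slice stemmed (some 0) (some endSuffixStart)
    else
      pvSuffixLoop stemmed rest

def suffix_remover (data : String) : String :=
  String.ofList (pvSuffixLoop data.toList (pvSortListByStrLen pvSUFFIX))

-- ===== PORT B =====
-- _strip_len(r): character trie over the reversed word; r[i:i+1] == 'x' ported as
-- one-char slices on the char list (exact, including the empty slice on short input)
def pvStripLen (r : List Char) : Int :=
  if PySem.List.slice r none (some 1) = ['n'] then
    if PySem.List.slice r (some 1) (some 2) = ['a'] ∨ PySem.List.slice r (some 1) (some 2) = ['i'] then
      if PySem.List.slice r (some 2) (some 3) = ['h'] then 3 else 2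
    else 0
  else if PySem.List.slice r none (some 1) = ['g'] then
    if PySem.List.slice r (some 1) (some 2) = ['n'] then
      if PySem.List.slice r (some 2) (some 3) = ['i'] ∨ PySem.List.slice r (some 2) (some 3) = ['a'] then 3 else 2
    else 0
  else 0

-- data[::-1] is exactly list reversal (PySem.List.slice?_none_none_neg_one)
def suffix_remover_alt (data : String) : String :=
  let cs := data.toList
  let k := pvStripLen cs.reverse
  if k ≠ 0 then String.ofList (PySem.List.slice cs none (some ((cs.length : Int) - k))) else data

-- ===== PRECONDITION & SPEC =====
def Spec_suffix_remover (data : String) (out : String) : Prop := out = suffix_remover_alt data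
instance (data : String) (out : String) : Decidable (Spec_suffix_remover data out) := by unfold Spec_suffix_remover; infer_instance

-- ===== CLAIM (what is proved, stated in full; the proofs are below) =====
def Claim_equal_suffix_remover : Prop := ∀ (data : String), Dom_suffix_remover data → Spec_suffix_remover data (suffix_remover data)

-- ===== LEMMAS AND PROOFS =====

theorem sort_pvSUFFIX : pvSortListByStrLen pvSUFFIX = pvSUFFIX := by decide

-- canonical value of both programs on a word of length ≥ 3, ys ++ [a,b,c]
def pvCanon (ys : List Char) (a b c : Char) : List Char :=
  if (a = 'h' ∧ b = 'a' ∧ c = 'n') ∨ (a = 'h' ∧ b = 'i' ∧ c = 'n') ∨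
     (a = 'i' ∧ b = 'n' ∧ c = 'g') ∨ (a = 'a' ∧ b = 'n' ∧ c = 'g') then ys
  else if (b = 'n' ∧ c = 'g') ∨ (b = 'a' ∧ c = 'n') ∨ (b = 'i' ∧ c = 'n') then ys ++ [a]
  else ys ++ [a, b, c]

theorem slice3_from (ys : List Char) (a b c : Char) :
    PySem.List.slice (ys ++ [a,b,c]) (some (((ys ++ [a,b,c]).length : Int) - 3))
      (some ((ys ++ [a,b,c]).length : Int)) = [a,b,c] := by
  have e1 : ((ys ++ [a,b,c]).length : Int) - 3 = ((ys.length : Nat) : Int) := by simp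
  have e2 : ((ys ++ [a,b,c]).length : Int) = (((ys.length + 3 : Nat)) : Int) := by simp
  rw [e1, e2, PySem.List.slice_natCast]
  simp

theorem slice2_from (ys : List Char) (a b c : Char) :
    PySem.List.slice (ys ++ [a,b,c]) (some (((ys ++ [a,b,c]).length : Int) - 2))
      (some ((ys ++ [a,b,c]).length : Int)) = [b,c] := by
  have e1 : ((ys ++ [a,b,c]).length : Int) - 2 = (((ys.length + 1 : Nat)) : Int) := by simp; ring
  have e2 : ((ys ++ [a,b,c]).length : Int) = (((ys.length + 3 : Nat)) : Int) := by simp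
  rw [e1, e2, PySem.List.slice_natCast]
  have : ys.length + 3 - (ys.length + 1) = 2 := by omega
  rw [this]
  simp [List.drop_append, List.drop_eq_nil_of_le (by omega : ys.length ≤ ys.length + 1)]

theorem slice3_to (ys : List Char) (a b c : Char) :
    PySem.List.slice (ys ++ [a,b,c]) none
      (some (((ys ++ [a,b,c]).length : Int) - 3)) = ys := by
  have e1 : ((ys ++ [a,b,c]).length : Int) - 3 = ((ys.length : Nat) : Int) := by simp
  rw [e1, PySem.List.slice_to_natCast]
  simp

theorem slice2_to (ys : List Char) (a b c : Char) :
    PySem.List.slice (ys ++ [a,b,c]) none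
      (some (((ys ++ [a,b,c]).length : Int) - 2)) = ys ++ [a] := by
  have e1 : ((ys ++ [a,b,c]).length : Int) - 2 = (((ys.length + 1 : Nat)) : Int) := by simp; ring
  rw [e1, PySem.List.slice_to_natCast]
  simp [List.take_append]

theorem zero_slice (cs : List Char) (k : Int) :
    PySem.List.slice cs (some 0) (some k) = PySem.List.slice cs none (some k) :=
  PySem.List.slice_zero_start cs (some k)

set_option maxHeartbeats 2000000 in
theorem A_case3 (ys : List Char) (a b c : Char) :
    pvSuffixLoop (ys ++ [a,b,c]) pvSUFFIX = pvCanon ys a b c := by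
  simp only [pvSuffixLoop, pvSUFFIX, List.length_cons, List.length_nil, Nat.reduceAdd,
    Nat.cast_ofNat, slice3_from, slice2_from, zero_slice, slice3_to, slice2_to,
    List.cons.injEq, and_true]
  unfold pvCanon
  by_cases h1 : (a = 'h' ∧ b = 'a' ∧ c = 'n') ∨ (a = 'h' ∧ b = 'i' ∧ c = 'n') ∨
     (a = 'i' ∧ b = 'n' ∧ c = 'g') ∨ (a = 'a' ∧ b = 'n' ∧ c = 'g')
  · rw [if_pos h1]
    rcases h1 with ⟨rfl,rfl,rfl⟩|⟨rfl,rfl,rfl⟩|⟨rfl,rfl,rfl⟩|⟨rfl,rfl,rfl⟩ <;> simp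
  · rw [if_neg h1]
    push Not at h1
    obtain ⟨n1, n2, n3, n4⟩ := h1
    by_cases h2 : (b = 'n' ∧ c = 'g') ∨ (b = 'a' ∧ c = 'n') ∨ (b = 'i' ∧ c = 'n')
    · rw [if_pos h2]
      rcases h2 with ⟨rfl,rfl⟩|⟨rfl,rfl⟩|⟨rfl,rfl⟩ <;> simp_all
    · rw [if_neg h2]
      push Not at h2
      obtain ⟨m1, m2, m3⟩ := h2
      split_ifs <;> simp_all

set_option maxHeartbeats 1000000 in
theorem B_case3 (ys : List Char) (a b c : Char) (t : List Char) :
    (let k := pvStripLen (c :: b :: a :: t);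
     if k ≠ 0 then PySem.List.slice (ys ++ [a,b,c]) none (some (((ys ++ [a,b,c]).length : Int) - k))
     else ys ++ [a,b,c]) = pvCanon ys a b c := by
  have r1 : PySem.List.slice (c :: b :: a :: t) none (some 1) = [c] := by
    simp [PySem.List.slice, PySem.List.clampIdx]
  have r2 : PySem.List.slice (c :: b :: a :: t) (some 1) (some 2) = [b] := by
    simp [PySem.List.slice, PySem.List.clampIdx]
  have r3 : PySem.List.slice (c :: b :: a :: t) (some 2) (some 3) = [a] := by
    simp [PySem.List.slice, PySem.List.clampIdx]
  simp only [pvStripLen, r1, r2, r3, List.cons.injEq, and_true, pvCanon]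
  split_ifs <;>
    first
      | rfl
      | (exact slice3_to ys a b c)
      | (exact slice2_to ys a b c)
      | tauto
      | simp_all

theorem main_lists (cs : List Char) :
    pvSuffixLoop cs pvSUFFIX =
      (let k := pvStripLen cs.reverse
       if k ≠ 0 then PySem.List.slice cs none (some ((cs.length : Int) - k)) else cs) := by
  rcases h : cs.reverse with _ | ⟨c, _ | ⟨b, _ | ⟨a, t⟩⟩⟩
  · have hcs : cs = [] := by rw [← List.reverse_reverse cs, h]; rfl
    subst hcs; decide
  · have hcs : cs = [c] := by rw [← List.reverse_reverse cs, h]; rfl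
    subst hcs
    simp [pvSuffixLoop, pvSUFFIX, pvStripLen, PySem.List.slice, PySem.List.clampIdx]
  · have hcs : cs = [b, c] := by rw [← List.reverse_reverse cs, h]; rfl
    subst hcs
    simp [pvSuffixLoop, pvSUFFIX, pvStripLen, PySem.List.slice, PySem.List.clampIdx]
    split_ifs <;> simp_all
  · have hcs : cs = t.reverse ++ [a, b, c] := by
      rw [← List.reverse_reverse cs, h]; simp
    rw [hcs, A_case3]
    exact (B_case3 t.reverse a b c t).symm

-- ===== VERDICT (by name: the statement is the Claim_ definition above) =====
theorem suffix_remover_spec : Claim_equal_suffix_remover := by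
  intro data _
  show suffix_remover data = suffix_remover_alt data
  unfold suffix_remover suffix_remover_alt
  rw [sort_pvSUFFIX, main_lists]
  simp only []
  split_ifs
  · rfl
  · exact String.ofList_toList
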